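-- pv_equiv track=rewrite | github.com/izumism/algorithms | strings/suffix_array.py | get_cyclic_order_index
-- ===== SOURCE A (Python) =====
-- def get_cyclic_order_index(string, length) -> [int]:
--     result = {}
--     source_len = len(string)
--     for pos in range(source_len):
--         start = pos
--         end = start + length
--         if end >= source_len:
--             cyclic_substr = string[start:] + string[:end % source_len]
--             result[pos] = cyclic_substr
--         else:
--             cyclic_substr = string[start:end]
--             result[pos] = cyclic_substr
--     return [
--         pos for (pos, substr) in sorted(result.items(), key=lambda x: x[1])
--     ]
-- ===== SOURCE B (Python) =====
-- def get_cyclic_order_index(string, length) -> [int]: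
--     n = len(string)
--     keys = []
--     for pos in range(n):
--         end = pos + length
--         if end >= n:
--             keys.append(string[pos:] + string[:end % n])
--         else:
--             keys.append(string[pos:end])
--     width = max((len(k) for k in keys), default=0)
--     order = list(range(n))
--     for j in range(width - 1, -1, -1):
--         buckets = [[] for _ in range(128)]
--         for p in order:
--             k = keys[p]
--             buckets[ord(k[j]) if j < len(k) else 0].append(p)
--         order = [p for bucket in buckets for p in bucket]
--     return order
-- ===== Notes on version B (the rewrite author's own statement) =====
-- stated objective: alternative
-- what changed: B drops the dict and the comparison sort entirely: it builds the cyclic keys once and orders the positions by a stable LSD radix sort - one bucket pass per key-character column from last to first (128 buckets, missing characters in bucket 0), ties resolved by the passes' stability instead of by sorted().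
import Mathlib
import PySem

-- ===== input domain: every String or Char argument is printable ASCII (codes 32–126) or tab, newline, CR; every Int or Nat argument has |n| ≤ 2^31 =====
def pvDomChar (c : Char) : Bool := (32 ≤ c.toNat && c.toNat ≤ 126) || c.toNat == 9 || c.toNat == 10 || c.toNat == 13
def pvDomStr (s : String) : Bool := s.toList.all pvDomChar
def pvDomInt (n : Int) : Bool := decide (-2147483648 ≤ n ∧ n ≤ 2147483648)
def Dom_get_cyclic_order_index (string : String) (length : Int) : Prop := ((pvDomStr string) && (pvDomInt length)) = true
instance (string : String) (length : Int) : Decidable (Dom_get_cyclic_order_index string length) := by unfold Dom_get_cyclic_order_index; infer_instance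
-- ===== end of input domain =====

-- B replaces A's dict build + comparison sort (sorted with a string key) by an LSD radix sort:
-- stable bucket passes over the key characters, least-significant first; no comparison sort at all.
-- (Objective: alternative algorithm; not measured faster — A's C-implemented sorted wins on constants.)

-- ===== PORT A =====
def get_cyclic_order_index (string : String) (length : Int) : List Int :=
  let s := string.toList
  let source_len : Int := (s.length : Int)
  let result := (PySem.List.pyRange 0 source_len 1).foldl (fun d pos =>
    let start := pos
    let end_ := start + length
    if end_ ≥ source_len then
      d.insert pos (PySem.List.slice s (some start) none ++
                    PySem.List.slice s none (some (PySem.Int.mod end_ source_len)))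
    else
      d.insert pos (PySem.List.slice s (some start) (some end_))) PySem.Dict.empty
  (PySem.List.sorted result.items (fun x => x.2) false).map (fun p => p.1)

-- ===== PORT B =====
-- Source B: build the cyclic keys, then LSD radix sort the positions: one stable bucket pass
-- per character column, from the last column to the first (missing chars bucket 0).
def get_cyclic_order_index_alt (string : String) (length : Int) : List Int :=
  let s := string.toList
  let n : Int := (s.length : Int)
  let keys : List (List Char) := (PySem.List.pyRange 0 n 1).foldl (fun ks pos =>
    let end_ := pos + length
    if end_ ≥ n then
      ks ++ [PySem.List.slice s (some pos) none ++ PySem.List.slice s none (some (PySem.Int.mod end_ n))]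
    else
      ks ++ [PySem.List.slice s (some pos) (some end_)]) []
  let width : Int := PySem.List.maxD (keys.map (fun k => ((k.length : Int)))) (fun x => x) 0
  let order0 := PySem.List.pyRange 0 n 1
  (PySem.List.pyRange (width - 1) (-1) (-1)).foldl (fun order j =>
    let buckets := order.foldl (fun bs p =>
      let k := PySem.List.pyGetD keys p []
      let c : Int := if j < (k.length : Int) then ((PySem.List.pyGetD k j ' ').toNat : Int) else 0
      PySem.List.pySetD bs c (PySem.List.pyGetD bs c [] ++ [p])) (List.replicate 128 ([] : List Int))
    buckets.flatten) order0

-- ===== PRECONDITION & SPEC =====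
def Spec_get_cyclic_order_index (string : String) (length : Int) (out : List Int) : Prop := out = get_cyclic_order_index_alt string length
instance (string : String) (length : Int) (out : List Int) : Decidable (Spec_get_cyclic_order_index string length out) := by unfold Spec_get_cyclic_order_index; infer_instance

-- ===== CLAIM (what is proved, stated in full; the proofs are below) =====
def Claim_equal_get_cyclic_order_index : Prop := ∀ (string : String) (length : Int), Dom_get_cyclic_order_index string length → Spec_get_cyclic_order_index string length (get_cyclic_order_index string length)

-- ===== LEMMAS AND PROOFS =====

-- the substring both programs assign to position pos, as one function of pos
def pvKey (s : List Char) (length pos : Int) : List Char :=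
  if pos + length ≥ (s.length : Int) then
    PySem.List.slice s (some pos) none ++
    PySem.List.slice s none (some (PySem.Int.mod (pos + length) (s.length : Int)))
  else
    PySem.List.slice s (some pos) (some (pos + length))

-- the radix digit of a key at column j: its j-th character code, 0 past the end
def pvDig (u : List Char) (j : Nat) : Nat :=
  match u.drop j with
  | [] => 0
  | c :: _ => c.toNat

-- the order B's rounds j .. width-1 have established: positions compared by
-- (key suffix from column j, position) lexicographically
def pvLt (s : List Char) (length : Int) (j : Nat) (p q : Int) : Prop :=
  toLex ((pvKey s length p).drop j, p) < toLex ((pvKey s length q).drop j, q)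

-- one bucket pass of B, as it appears in the port (buckets as a 128-slot table)
def pvStep (keysL : List (List Char)) (order : List Int) (j : Int) : List Int :=
  (order.foldl (fun bs p =>
      let k := PySem.List.pyGetD keysL p []
      let c : Int := if j < (k.length : Int) then ((PySem.List.pyGetD k j ' ').toNat : Int) else 0
      PySem.List.pySetD bs c (PySem.List.pyGetD bs c [] ++ [p])) (List.replicate 128 ([] : List Int))).flatten

lemma pv_mem_slice {x : List Char} {a b : Option Int} {c : Char}
    (h : c ∈ PySem.List.slice x a b) : c ∈ x := by
  simp only [PySem.List.slice] at h
  exact List.mem_of_mem_drop (List.mem_of_mem_take h)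

lemma pvKey_chars {s : List Char} (length pos : Int)
    (hs : ∀ c ∈ s, 9 ≤ c.toNat ∧ c.toNat ≤ 126) :
    ∀ c ∈ pvKey s length pos, 9 ≤ c.toNat ∧ c.toNat ≤ 126 := by
  intro c hc
  unfold pvKey at hc
  split at hc
  · rcases List.mem_append.mp hc with h | h
    · exact hs c (pv_mem_slice h)
    · exact hs c (pv_mem_slice h)
  · exact hs c (pv_mem_slice hc)

lemma pv_toNat_inj {c d : Char} (h : c.toNat = d.toNat) : c = d := by
  apply Char.ext
  exact UInt32.toNat_inj.mp h

-- relating digits at column j to the lexicographic order of the suffixes from column j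
lemma pvDig_eq_nil {u : List Char} {j : Nat} (h : u.drop j = []) : pvDig u j = 0 := by
  unfold pvDig; rw [h]

lemma pvDig_eq_cons {u : List Char} {j : Nat} {c : Char} {t : List Char}
    (h : u.drop j = c :: t) : pvDig u j = c.toNat := by
  unfold pvDig; rw [h]

lemma pvDig_drop_tail (u : List Char) (j : Nat) {c : Char} {t : List Char}
    (h : u.drop j = c :: t) : u.drop (j + 1) = t := by
  have h2 : (u.drop j).drop 1 = u.drop (j + 1) := List.drop_drop
  rw [h] at h2
  simpa using h2.symm

lemma pvDrop_succ_nil {u : List Char} {j : Nat} (h : u.drop j = []) : u.drop (j + 1) = [] := by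
  have h2 : (u.drop j).drop 1 = u.drop (j + 1) := List.drop_drop
  rw [h] at h2
  simpa using h2.symm

lemma pvDig_zero_iff {u : List Char} {j : Nat}
    (hu : ∀ c ∈ u, 9 ≤ c.toNat ∧ c.toNat ≤ 126) :
    pvDig u j = 0 ↔ u.drop j = [] := by
  rcases hdu : u.drop j with _ | ⟨c, t⟩
  · simp [pvDig_eq_nil hdu]
  · rw [pvDig_eq_cons hdu]
    have hc : c ∈ u := List.mem_of_mem_drop (hdu ▸ List.mem_cons_self)
    have h9 := (hu c hc).1
    constructor
    · intro h0; omega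
    · intro h0; simp at h0

lemma pvDig_lt_of_lt {u v : List Char} {j : Nat}
    (h : pvDig u j < pvDig v j) : u.drop j < v.drop j := by
  rcases hdv : v.drop j with _ | ⟨d, r⟩
  · rw [pvDig_eq_nil hdv] at h; omega
  · rcases hdu : u.drop j with _ | ⟨c, t⟩
    · exact List.nil_lt_cons d r
    · rw [pvDig_eq_cons hdu, pvDig_eq_cons hdv] at h
      exact List.cons_lt_cons_iff.mpr (Or.inl (Char.lt_def.mpr h))

lemma pvDig_lt_of_eq_of_lt {u v : List Char} {j : Nat}
    (hu : ∀ c ∈ u, 9 ≤ c.toNat ∧ c.toNat ≤ 126)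
    (hv : ∀ c ∈ v, 9 ≤ c.toNat ∧ c.toNat ≤ 126)
    (heq : pvDig u j = pvDig v j)
    (h : u.drop (j + 1) < v.drop (j + 1)) : u.drop j < v.drop j := by
  rcases hdu : u.drop j with _ | ⟨c, t⟩
  · have h0 : pvDig v j = 0 := by rw [← heq, pvDig_eq_nil hdu]
    have hv0 : v.drop j = [] := (pvDig_zero_iff hv).mp h0
    rw [pvDrop_succ_nil hdu, pvDrop_succ_nil hv0] at h
    exact absurd h (lt_irrefl _)
  · have hne : pvDig v j ≠ 0 := by
      have hc : c ∈ u := List.mem_of_mem_drop (hdu ▸ List.mem_cons_self)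
      have h9 := (hu c hc).1
      rw [← heq, pvDig_eq_cons hdu]; omega
    rcases hdv : v.drop j with _ | ⟨d, r⟩
    · exact absurd (pvDig_eq_nil hdv) hne
    · have hcd : c = d := by
        apply pv_toNat_inj
        rw [← pvDig_eq_cons hdu, ← pvDig_eq_cons hdv, heq]
      rw [pvDig_drop_tail u j hdu, pvDig_drop_tail v j hdv] at h
      exact List.cons_lt_cons_iff.mpr (Or.inr ⟨hcd, h⟩)

lemma pvDig_eq_of_eq_of_eq {u v : List Char} {j : Nat}
    (hu : ∀ c ∈ u, 9 ≤ c.toNat ∧ c.toNat ≤ 126)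
    (hv : ∀ c ∈ v, 9 ≤ c.toNat ∧ c.toNat ≤ 126)
    (heq : pvDig u j = pvDig v j)
    (h : u.drop (j + 1) = v.drop (j + 1)) : u.drop j = v.drop j := by
  rcases hdu : u.drop j with _ | ⟨c, t⟩
  · have h0 : pvDig v j = 0 := by rw [← heq, pvDig_eq_nil hdu]
    rw [(pvDig_zero_iff hv).mp h0]
  · have hne : pvDig v j ≠ 0 := by
      have hc : c ∈ u := List.mem_of_mem_drop (hdu ▸ List.mem_cons_self)
      have h9 := (hu c hc).1
      rw [← heq, pvDig_eq_cons hdu]; omega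
    rcases hdv : v.drop j with _ | ⟨d, r⟩
    · exact absurd (pvDig_eq_nil hdv) hne
    · have hcd : c = d := by
        apply pv_toNat_inj
        rw [← pvDig_eq_cons hdu, ← pvDig_eq_cons hdv, heq]
      rw [pvDig_drop_tail u j hdu, pvDig_drop_tail v j hdv] at h
      rw [hcd, h]

lemma pvDig_lt_128 {u : List Char} {j : Nat}
    (hu : ∀ c ∈ u, 9 ≤ c.toNat ∧ c.toNat ≤ 126) : pvDig u j < 128 := by
  rcases hdu : u.drop j with _ | ⟨c, t⟩
  · rw [pvDig_eq_nil hdu]; omega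
  · rw [pvDig_eq_cons hdu]
    have hc : c ∈ u := List.mem_of_mem_drop (hdu ▸ List.mem_cons_self)
    have := (hu c hc).2
    omega

-- the bucket-filling fold builds exactly the per-digit filters of the input
lemma pvBucketsFold (dg : Int → Nat) :
    ∀ (ord : List Int) (bs0 : List (List Int)), bs0.length = 128 → (∀ p ∈ ord, dg p < 128) →
    ord.foldl (fun bs p => bs.set (dg p) (bs.getD (dg p) [] ++ [p])) bs0
      = (List.range 128).map (fun d => bs0.getD d [] ++ ord.filter (fun p => decide (dg p = d))) := by
  intro ord
  induction ord with
  | nil =>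
    intro bs0 hlen _
    simp only [List.foldl_nil, List.filter_nil, List.append_nil]
    refine List.ext_getElem (by simp [hlen]) ?_
    intro i h1 h2
    rw [List.getElem_map, List.getElem_range, List.getD_eq_getElem bs0 [] h1]
  | cons a ord ih =>
    intro bs0 hlen hdg
    rw [List.foldl_cons]
    rw [ih (bs0.set (dg a) (bs0.getD (dg a) [] ++ [a])) (by simp [hlen])
        (fun p hp => hdg p (List.mem_cons_of_mem _ hp))]
    apply List.map_congr_left
    intro d hd
    have hd128 : d < 128 := List.mem_range.mp hd
    by_cases hda : dg a = d
    · subst hda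
      rw [List.getD_eq_getElem?_getD, List.getElem?_set_self (by omega), List.filter_cons]
      simp [List.append_assoc]
    · rw [List.getD_eq_getElem?_getD, List.getElem?_set_ne hda, ← List.getD_eq_getElem?_getD,
          List.filter_cons]
      simp [hda]

-- one pass of B, rewritten from table form to per-digit filters
lemma pvStep_eq (s : List Char) (length : Int) (j : Int) (hj : 0 ≤ j)
    (hchars : ∀ c ∈ s, 9 ≤ c.toNat ∧ c.toNat ≤ 126)
    (order : List Int) (hmem : ∀ p ∈ order, 0 ≤ p ∧ p < (s.length : Int)) :
    pvStep ((PySem.List.pyRange 0 (s.length : Int) 1).map (pvKey s length)) order j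
      = ((List.range 128).map (fun d =>
          order.filter (fun p => decide (pvDig (pvKey s length p) j.toNat = d)))).flatten := by
  unfold pvStep
  have hbody : order.foldl (fun bs p =>
      let k := PySem.List.pyGetD ((PySem.List.pyRange 0 (s.length : Int) 1).map (pvKey s length)) p []
      let c : Int := if j < (k.length : Int) then ((PySem.List.pyGetD k j ' ').toNat : Int) else 0
      PySem.List.pySetD bs c (PySem.List.pyGetD bs c [] ++ [p])) (List.replicate 128 ([] : List Int))
      = order.foldl (fun bs p =>
          bs.set (pvDig (pvKey s length p) j.toNat)
            (bs.getD (pvDig (pvKey s length p) j.toNat) [] ++ [p])) (List.replicate 128 ([] : List Int)) := by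
    apply PySem.List.foldl_congr_mem
    intro bs p hp
    obtain ⟨hp0, hpn⟩ := hmem p hp
    have hk : PySem.List.pyGetD ((PySem.List.pyRange 0 (s.length : Int) 1).map (pvKey s length)) p []
        = pvKey s length p := PySem.List.pyGetD_map_pyRange_of_nonneg _ _ _ _ hp0 hpn
    simp only [hk]
    set u := pvKey s length p
    by_cases hlt : j < (u.length : Int)
    · have hjn : j.toNat < u.length := by omega
      have hc : PySem.List.pyGetD u j ' ' = u.getD j.toNat ' ' :=
        PySem.List.pyGetD_of_nonneg u ' ' hj
      have hdig : pvDig u j.toNat = (u.getD j.toNat ' ').toNat := by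
        rw [pvDig_eq_cons (List.drop_eq_getElem_cons hjn), List.getD_eq_getElem u ' ' hjn]
      rw [if_pos hlt, hc]
      have hnn : (0 : Int) ≤ (((u.getD j.toNat ' ').toNat : Nat) : Int) := Int.natCast_nonneg _
      rw [PySem.List.pySetD_of_nonneg _ _ hnn, PySem.List.pyGetD_of_nonneg _ _ hnn]
      simp [hdig]
    · have hjn : u.length ≤ j.toNat := by omega
      have hdig : pvDig u j.toNat = 0 := pvDig_eq_nil (List.drop_eq_nil_of_le hjn)
      rw [if_neg hlt]
      rw [PySem.List.pySetD_of_nonneg _ _ le_rfl, PySem.List.pyGetD_of_nonneg _ _ le_rfl]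
      simp [hdig]
  rw [hbody]
  rw [pvBucketsFold _ order (List.replicate 128 []) (by simp)
      (fun p hp => pvDig_lt_128 (pvKey_chars length p hchars))]
  congr 1

-- a bucket pass permutes its input (digits all < 128, input without duplicates)
lemma pvRound_perm (dg : Int → Nat) (ord : List Int) (hnd : ord.Nodup)
    (hdg : ∀ p ∈ ord, dg p < 128) :
    (((List.range 128).map (fun d => ord.filter (fun p => decide (dg p = d)))).flatten).Perm ord := by
  rw [List.perm_ext_iff_of_nodup ?_ hnd]
  · intro a
    constructor
    · intro ha
      obtain ⟨l, hl, hal⟩ := List.mem_flatten.mp ha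
      obtain ⟨d, _, rfl⟩ := List.mem_map.mp hl
      exact (List.mem_filter.mp hal).1
    · intro ha
      refine List.mem_flatten.mpr ⟨_, List.mem_map.mpr ⟨dg a, List.mem_range.mpr (hdg a ha), rfl⟩, ?_⟩
      rw [List.mem_filter]
      exact ⟨ha, by simp⟩
  · rw [List.nodup_flatten]
    constructor
    · intro l hl
      obtain ⟨d, _, rfl⟩ := List.mem_map.mp hl
      exact hnd.filter _
    · rw [List.pairwise_map]
      apply (List.pairwise_lt_range).imp_of_mem
      intro d1 d2 _ _ hlt
      rw [List.disjoint_left]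
      intro a ha1 ha2
      rw [List.mem_filter, decide_eq_true_eq] at ha1 ha2
      omega

-- a stable bucket pass: output ordered by R when input is ordered by S,
-- R holding across strictly increasing digits and refining S inside a digit class
lemma pvRound_pairwise (dg : Int → Nat) (ord : List Int)
    (R S : Int → Int → Prop) (h : ord.Pairwise S)
    (hRS : ∀ p q, p ∈ ord → q ∈ ord → dg p = dg q → S p q → R p q)
    (hlt : ∀ p q, p ∈ ord → q ∈ ord → dg p < dg q → R p q) :
    (((List.range 128).map (fun d => ord.filter (fun p => decide (dg p = d)))).flatten).Pairwise R := by
  rw [List.pairwise_flatten]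
  constructor
  · intro l hl
    obtain ⟨d, _, rfl⟩ := List.mem_map.mp hl
    apply (h.filter _).imp_of_mem
    intro a b ha hb hs
    rw [List.mem_filter, decide_eq_true_eq] at ha hb
    exact hRS a b ha.1 hb.1 (ha.2.trans hb.2.symm) hs
  · rw [List.pairwise_map]
    apply (List.pairwise_lt_range).imp_of_mem
    intro d1 d2 _ _ hd x hx y hy
    rw [List.mem_filter, decide_eq_true_eq] at hx hy
    exact hlt x y hx.1 hy.1 (by omega)

-- B's whole round loop: rounds jn-1 .. 0 turn an order sorted by suffixes from jn
-- into the order sorted by whole (key, position) pairs, and keep it a permutation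
lemma pvRounds (s : List Char) (length : Int)
    (hchars : ∀ c ∈ s, 9 ≤ c.toNat ∧ c.toNat ≤ 126) :
    ∀ (jn : Nat) (ord : List Int),
      ord.Perm (PySem.List.pyRange 0 (s.length : Int) 1) →
      ord.Pairwise (pvLt s length jn) →
      ((PySem.List.pyRange ((jn : Int) - 1) (-1) (-1)).foldl
          (pvStep ((PySem.List.pyRange 0 (s.length : Int) 1).map (pvKey s length))) ord).Perm
        (PySem.List.pyRange 0 (s.length : Int) 1)
      ∧ ((PySem.List.pyRange ((jn : Int) - 1) (-1) (-1)).foldl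
          (pvStep ((PySem.List.pyRange 0 (s.length : Int) 1).map (pvKey s length))) ord).Pairwise
        (pvLt s length 0) := by
  intro jn
  induction jn with
  | zero =>
    intro ord hperm hpw
    rw [PySem.List.pyRange_neg_one_eq_nil (by norm_num)]
    exact ⟨hperm, hpw⟩
  | succ jn ih =>
    intro ord hperm hpw
    have hcast : ((jn + 1 : Nat) : Int) - 1 = (jn : Int) := by push_cast; ring
    rw [hcast, PySem.List.pyRange_neg_one_cons (by omega), List.foldl_cons]
    have hmem : ∀ p ∈ ord, 0 ≤ p ∧ p < (s.length : Int) := by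
      intro p hp
      exact PySem.List.mem_pyRange_one.mp (hperm.mem_iff.mp hp)
    have hstep := pvStep_eq s length (jn : Int) (by omega) hchars ord hmem
    have htoNat : ((jn : Int)).toNat = jn := by omega
    rw [htoNat] at hstep
    set dg : Int → Nat := fun p => pvDig (pvKey s length p) jn with hdg
    have hdgb : ∀ p ∈ ord, dg p < 128 := fun p _ => pvDig_lt_128 (pvKey_chars length p hchars)
    have hnd : ord.Nodup := hperm.symm.nodup (PySem.List.nodup_pyRange_one _ _)
    have hperm' : (pvStep ((PySem.List.pyRange 0 (s.length : Int) 1).map (pvKey s length))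
        ord (jn : Int)).Perm (PySem.List.pyRange 0 (s.length : Int) 1) := by
      rw [hstep]
      exact (pvRound_perm dg ord hnd hdgb).trans hperm
    have hpw' : (pvStep ((PySem.List.pyRange 0 (s.length : Int) 1).map (pvKey s length))
        ord (jn : Int)).Pairwise (pvLt s length jn) := by
      rw [hstep]
      apply pvRound_pairwise dg ord _ (pvLt s length (jn + 1)) hpw
      · intro p q _ _ hde hs
        have hup := pvKey_chars length p hchars
        have huq := pvKey_chars length q hchars
        unfold pvLt at hs ⊢
        rw [Prod.Lex.toLex_lt_toLex] at hs ⊢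
        rcases hs with hlt | ⟨heq, hpq⟩
        · exact Or.inl (pvDig_lt_of_eq_of_lt hup huq hde hlt)
        · exact Or.inr ⟨pvDig_eq_of_eq_of_eq hup huq hde heq, hpq⟩
      · intro p q _ _ hdlt
        unfold pvLt
        rw [Prod.Lex.toLex_lt_toLex]
        exact Or.inl (pvDig_lt_of_lt hdlt)
    exact ih _ hperm' hpw'

lemma pvR_le {α : Type} (k : α → List Char) (t : α → Int) {a b : α}
    (h : toLex (k a, t a) ≤ toLex (k b, t b)) : k a ≤ k b := by
  rw [Prod.Lex.toLex_le_toLex] at h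
  rcases h with h | ⟨h, _⟩
  · exact le_of_lt h
  · exact le_of_eq h

-- stability of A's insertion sort: with strictly increasing tags, inserting a
-- maximal-tag element keeps the result pairwise nondecreasing in (key, tag) lex order
lemma pvInsertBy_stable {α : Type} (k : α → List Char) (t : α → Int)
    (x : α) (acc : List α)
    (hacc : acc.Pairwise (fun a b => toLex (k a, t a) ≤ toLex (k b, t b)))
    (htag : ∀ y ∈ acc, t y < t x) :
    (PySem.List.insertBy (fun a b => decide (k a < k b)) x acc).Pairwise
      (fun a b => toLex (k a, t a) ≤ toLex (k b, t b)) := by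
  induction acc with
  | nil => simp [PySem.List.insertBy]
  | cons a l ih =>
    rw [List.pairwise_cons] at hacc
    obtain ⟨ha, hl⟩ := hacc
    by_cases hxa : k x < k a
    · simp only [PySem.List.insertBy, decide_eq_true_eq, if_pos hxa]
      rw [List.pairwise_cons]
      refine ⟨?_, by rw [List.pairwise_cons]; exact ⟨ha, hl⟩⟩
      intro z hz
      rcases List.mem_cons.mp hz with rfl | hzl
      · exact le_of_lt (by rw [Prod.Lex.toLex_lt_toLex]; exact Or.inl hxa)
      · have : k a ≤ k z := pvR_le k t (ha z hzl)
        exact le_of_lt (by rw [Prod.Lex.toLex_lt_toLex]; exact Or.inl (lt_of_lt_of_le hxa this))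
    · simp only [PySem.List.insertBy, decide_eq_true_eq, if_neg hxa]
      rw [List.pairwise_cons]
      constructor
      · intro z hz
        rcases (PySem.List.mem_insertBy _ _ _ _).mp hz with rfl | hzl
        · rw [Prod.Lex.toLex_le_toLex]
          rcases lt_or_eq_of_le (le_of_not_gt hxa) with h | h
          · exact Or.inl h
          · exact Or.inr ⟨h, le_of_lt (htag a (List.mem_cons_self))⟩
        · exact ha z hzl
      · exact ih hl (fun y hy => htag y (List.mem_cons_of_mem _ hy))

lemma pvSorted_stable {α : Type} (k : α → List Char) (t : α → Int)
    (xs : List α) (hxs : xs.Pairwise (fun a b => t a < t b)) :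
    (PySem.List.sorted xs k false).Pairwise
      (fun a b => toLex (k a, t a) ≤ toLex (k b, t b)) := by
  rw [PySem.List.sorted_eq_foldl_insertBy]
  suffices h : ∀ (acc : List α),
      acc.Pairwise (fun a b => toLex (k a, t a) ≤ toLex (k b, t b)) →
      (∀ y ∈ acc, ∀ x ∈ xs, t y < t x) →
      (xs.foldl (fun acc x => PySem.List.insertBy (fun a b => decide (k a < k b)) x acc) acc).Pairwise
        (fun a b => toLex (k a, t a) ≤ toLex (k b, t b)) by
    exact h [] (by simp) (by simp)
  induction xs with
  | nil => intro acc h1 _; simpa using h1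
  | cons x xs ih =>
    intro acc h1 h2
    rw [List.pairwise_cons] at hxs
    simp only [List.foldl_cons]
    refine ih hxs.2 _ ?_ ?_
    · exact pvInsertBy_stable k t x acc h1 (fun y hy => h2 y hy x List.mem_cons_self)
    · intro y hy z hz
      rcases (PySem.List.mem_insertBy _ _ _ _).mp hy with rfl | hyl
      · exact hxs.1 z hz
      · exact h2 y hyl z (List.mem_cons_of_mem _ hz)

-- ===== VERDICT (by name: the statement is the Claim_ definition above) =====
theorem get_cyclic_order_index_spec : Claim_equal_get_cyclic_order_index := by
  intro string length hdom
  unfold Spec_get_cyclic_order_index get_cyclic_order_index get_cyclic_order_index_alt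
  simp only []
  set s := string.toList with hs
  set n : Int := (s.length : Int) with hn
  have hchars : ∀ c ∈ s, 9 ≤ c.toNat ∧ c.toNat ≤ 126 := by
    intro c hc
    unfold Dom_get_cyclic_order_index pvDomStr at hdom
    rw [Bool.and_eq_true] at hdom
    have hb := (List.all_eq_true.mp hdom.1) c hc
    simp only [pvDomChar, Bool.or_eq_true, Bool.and_eq_true, decide_eq_true_eq,
      beq_iff_eq] at hb
    omega
  -- A's loop is an insert loop over fresh, distinct keys
  have hfold : (PySem.List.pyRange 0 n 1).foldl (fun d pos =>
      let start := pos
      let end_ := start + length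
      if end_ ≥ n then
        d.insert pos (PySem.List.slice s (some start) none ++
                      PySem.List.slice s none (some (PySem.Int.mod end_ n)))
      else
        d.insert pos (PySem.List.slice s (some start) (some end_))) PySem.Dict.empty
      = (PySem.List.pyRange 0 n 1).foldl
          (fun d pos => d.insert pos (pvKey s length pos)) PySem.Dict.empty := by
    apply PySem.List.foldl_congr_mem
    intro acc pos _
    simp only [pvKey, hn]
    split_ifs <;> rfl
  rw [hfold]
  have hitems : ((PySem.List.pyRange 0 n 1).foldl
      (fun d pos => d.insert pos (pvKey s length pos)) PySem.Dict.empty).items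
      = (PySem.List.pyRange 0 n 1).map (fun pos => (pos, pvKey s length pos)) := by
    have := PySem.Dict.items_foldl_insert_fresh (PySem.List.pyRange 0 n 1)
      (fun pos => pos) (fun pos => pvKey s length pos) PySem.Dict.empty
      (fun a _ => PySem.Dict.contains_empty a)
      (by rw [List.map_id']; exact PySem.List.nodup_pyRange_one 0 n)
    simpa using this
  rw [hitems]
  -- B's key list is the same keys, in position order
  have hkeys : (PySem.List.pyRange 0 n 1).foldl (fun ks pos =>
      let end_ := pos + length
      if end_ ≥ n then
        ks ++ [PySem.List.slice s (some pos) none ++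
               PySem.List.slice s none (some (PySem.Int.mod end_ n))]
      else
        ks ++ [PySem.List.slice s (some pos) (some end_)]) []
      = (PySem.List.pyRange 0 n 1).map (pvKey s length) := by
    rw [PySem.List.foldl_congr_mem _ _ (fun ks pos => ks ++ [pvKey s length pos]) []
        (by intro acc x _; simp only [pvKey, hn]; split_ifs <;> rfl)]
    simpa using PySem.List.foldl_append_singleton_eq_map (pvKey s length) (PySem.List.pyRange 0 n 1) []
  rw [hkeys]
  -- the maximal key length bounds every key
  set L : List Int := ((PySem.List.pyRange 0 n 1).map (pvKey s length)).map
      (fun k => ((k.length : Int))) with hL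
  set W : Int := PySem.List.maxD L (fun x => x) 0 with hW
  have hW0 : 0 ≤ W := by
    rcases hLc : L with _ | ⟨x, xs⟩
    · rw [hW, hLc]; decide
    · have hx : x ∈ L := by rw [hLc]; exact List.mem_cons_self
      obtain ⟨k, _, hkx⟩ := List.mem_map.mp hx
      have h1 : (0 : Int) ≤ x := by rw [← hkx]; positivity
      exact le_trans h1 (PySem.List.le_maxD_id L 0 x hx)
  have hWlen : ∀ p ∈ PySem.List.pyRange 0 n 1, (pvKey s length p).length ≤ W.toNat := by
    intro p hp
    have hx : ((pvKey s length p).length : Int) ∈ L :=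
      List.mem_map.mpr ⟨pvKey s length p, List.mem_map.mpr ⟨p, hp, rfl⟩, rfl⟩
    have := PySem.List.le_maxD_id L 0 _ hx
    omega
  -- the initial order is sorted by the empty suffixes from column W
  have hinit : (PySem.List.pyRange 0 n 1).Pairwise (pvLt s length W.toNat) := by
    apply (PySem.List.pairwise_lt_pyRange_one 0 n).imp_of_mem
    intro p q hp hq hlt
    unfold pvLt
    rw [List.drop_eq_nil_of_le (hWlen p hp), List.drop_eq_nil_of_le (hWlen q hq),
        Prod.Lex.toLex_lt_toLex]
    exact Or.inr ⟨rfl, hlt⟩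
  -- run B's rounds
  have hcast : W - 1 = ((W.toNat : Nat) : Int) - 1 := by omega
  obtain ⟨hperm, hpw⟩ := pvRounds s length hchars W.toNat (PySem.List.pyRange 0 n 1)
    (List.Perm.refl _) hinit
  rw [hn] at hperm hpw
  -- identify A's stable sort with B's final order, decorated with the keys
  have hT : PySem.List.sorted ((PySem.List.pyRange 0 n 1).map (fun pos => (pos, pvKey s length pos)))
        (fun x : Int × List Char => x.2) false
      = ((PySem.List.pyRange (((W.toNat : Nat) : Int) - 1) (-1) (-1)).foldl
          (pvStep ((PySem.List.pyRange 0 n 1).map (pvKey s length))) (PySem.List.pyRange 0 n 1)).map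
          (fun p => (p, pvKey s length p)) := by
    apply PySem.List.eq_of_perm_of_pairwise_le_of_injective
      (κ := Lex (List Char × Int)) (fun it => toLex (it.2, it.1))
    · intro a b hab
      have h2 : ((a.2, a.1) : List Char × Int) = (b.2, b.1) := toLex.injective hab
      have h3 := congrArg Prod.fst h2
      have h4 := congrArg Prod.snd h2
      simp only [] at h3 h4
      exact Prod.ext h4 h3
    · exact (PySem.List.sorted_perm _ _ _).trans ((hperm.map _).symm)
    · exact pvSorted_stable (fun x : Int × List Char => x.2) (fun x : Int × List Char => x.1) _
        (List.pairwise_map.mpr (PySem.List.pairwise_lt_pyRange_one 0 n))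
    · rw [List.pairwise_map]
      apply hpw.imp
      intro a b hab
      unfold pvLt at hab
      rw [List.drop_zero, List.drop_zero] at hab
      exact le_of_lt hab
  rw [hcast, hT, List.map_map]
  have hcomp : ((fun p : Int × List Char => p.1) ∘ fun p : Int => (p, pvKey s length p))
      = fun p : Int => p := rfl
  rw [hcomp, List.map_id']
  rfl
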